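/- GENERATED by mk_final_copies.py from the proof of the farm's unit `compute_codewords.1` (farm:compute_codewords.1.1: Proof.lean) as the
   re-elaboration sweep compiled it — do not edit. -/
import Asan.CheckWalk
import Vorbis.Spec.Units.compute_codewords_1

/- Segment 1 of compute_codewords (0x1081a0 – 0x108213, 25 instructions: the prologue with the two shadow stores of the PROTECTED frame,
   `memset(available, 0, 128)`), in the farm's format: the worker's continuation-passing walk `cw1_walk` (from the proof farm's attempt 1 of
   the unit `compute_codewords`), applied to `ReachVia.done` of the exit assertion `At1`. The protected frame: memset is called with
   `frames' = (rsp₀ − 248, Vorbis.Frames.compute_codewords) :: frames` (`cw_frame_pushed`), the body's shadow is that of `cw_poisonedMem u`. -/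
open X86 X86.User Asan Vorbis Vorbis.Spec
open Vorbis.Spec.compute_codewords

set_option maxRecDepth 4000
set_option maxHeartbeats 4000000

namespace Vorbis.Spec.compute_codewords_1

/-- **SEGMENT 1: entry 0x1081a0 → cut1 0x108218** (the prologue with its two shadow stores, `memset(available, 0, 128)`). The
continuation `hcont` receives the state after memset's return with the body's facts. -/
theorem cw1_walk {Lay : Layout} (hLay : Lay.hi = 0x1000000) {μ : Microarch} (hμ : UserX.MicroOK μ) {u₀ : State}
    (hcode : HasCodeNat Lay u₀ Vorbis.L.compute_codewords.entry Vorbis.Code.code_compute_codewords.nat Vorbis.L.compute_codewords.size)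
    {others : List Obj} {frames : List (Nat × FrameLayout)} {u : State} {ret : Word}
    (hms : Calls Lay μ Vorbis.WayInv (Vorbis.conv u₀) Vorbis.L.memset.entry
      (Vorbis.Spec.memset.spec others (((u.reg .rsp).toNat - 248, Vorbis.Frames.compute_codewords) :: frames)))
    (he : AtEntry (Vorbis.conv u₀) Vorbis.L.compute_codewords.entry 400 ret u) (hsh : ShadowPre others frames u)
    {Q : State → Prop}
    (hcont : ∀ s : State, s.rip = Vorbis.L.compute_codewords.cut1 → s.reg .r15 = (u.reg .rsp - 248) >>> 3 →
      s.reg .rbp = Word.ofBV (Word.part Width.w32 (u.reg .rdx)) → s.reg .r12 = u.reg .rsi →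
      RegsKept [.rdi, .rsi, .rdx, .r15, .rax, .rbp, .r12, .rsp, .rcx, .r8, .r9, .r10, .r11, .r16, .r17, .r18, .r19, .r20, .r21,
        .r22, .r23, .r24, .r25, .r26, .r27, .r28, .r29, .r30, .r31] u s → CwBody u₀ u ret [] s →
      ReachVia Lay μ Vorbis.WayInv s Q) :
    ReachVia Lay μ Vorbis.WayInv u Q := by
  v_entry he
  have hsp := hsh.rsp
  -- the shadow layer with the frame pushed (after 0x1081fa)
  have hN : ShadowUntouched u.mem (cw_prologueMem u) := by
    unfold cw_prologueMem
    v_untouched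
  have hinvB := cw_frame_pushed (u.reg .rsp) hsh.inv he_align (by omega) he_top hN
  u_walk hcode [hμ.vendor] until [Vorbis.L.compute_codewords.cut1] span [Vorbis.L.textLo, Vorbis.L.textHi] side (v_side)
  · v_inv
  · -- memset's precondition: the shadow layer with the frame pushed; `available` is a live object
    refine ⟨⟨?_, hsh.offText⟩, Or.inr ?_⟩
    · have e : (s_108213.reg .rsp).toNat + 8 = (u.reg .rsp).toNat - 296 := by
        rw [w_rsp]
        u_omega
      rw [e, w_mem]
      refine hinvB.untouched ?_
      unfold cw_prologueMem
      exact Mem.EqOn.writeLE _ _ _ _ _ _ (by u_omega) (by u_omega)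
    · refine ⟨_, cw_available_mem _ _ _, ?_, ?_⟩
      · show (u.reg .rsp).toNat - 248 + 32 ≤ (s_108213.reg .rdi).toNat
        rw [w_rdi]
        u_omega
      · show (s_108213.reg .rdi).toNat + (s_108213.reg .rdx).toNat ≤ (u.reg .rsp).toNat - 248 + 32 + 128
        rw [w_rdi, w_rdx]
        have e128 : (Word.ofBV 128#32).toNat = 128 := by decide
        rw [e128]
        u_omega
  -- 0x108218 (cut1), after memset
  obtain ⟨-, hun_ms, -⟩ := w_post
  have w_eq := Vorbis.conv_code_eqOn w_code
  have w_df := (show X86.User.abiInv _ from w_inv).1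
  have w_mx := (show X86.User.abiInv _ from w_inv).2
  have e128 : (Word.ofBV 128#32).toNat = 128 := by decide
  simp only [X86.User.Spec.footprint, vspec, w_rsp_108213, w_rdi_108213, w_rdx_108213, e128] at w_same
  clear w_has_1081a0 w_has_1081a2 w_has_1081a4 w_has_1081a6 w_has_1081a8 w_has_1081a9 w_has_1081b1 w_has_1081b9 w_has_1081c0
    w_has_1081c4 w_has_1081ce w_has_1081d7 w_has_1081e0 w_has_108213 w_kept_108213 w_inv w_code hms hcode
  -- the footprint so far
  have hsame' : Mem.SameExcept [⟨(u.reg .rsp).toNat - 400, (u.reg .rsp).toNat⟩,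
      ⟨0xC00000 + ((u.reg .rsp).toNat - 248) / 8, 0xC00000 + ((u.reg .rsp).toNat - 248) / 8 + 24⟩] u.mem s_108213.mem := by
    u_same
  have hsame : Mem.SameExcept [⟨(u.reg .rsp).toNat - 400, (u.reg .rsp).toNat⟩,
      ⟨0xC00000 + ((u.reg .rsp).toNat - 248) / 8, 0xC00000 + ((u.reg .rsp).toNat - 248) / 8 + 24⟩] u.mem s_108213r.mem := by
    refine hsame'.step_same' w_same ?_
    intro w hw
    simp only [List.mem_cons, List.not_mem_nil, or_false] at hw
    rcases hw with rfl | rfl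
    · right
      simp only [X86.User.inSpans_cons, X86.User.inSpans_nil, or_false]
      u_omega
    · right
      simp only [X86.User.inSpans_cons, X86.User.inSpans_nil, or_false]
      u_omega
  -- memset kept the stack outside `available` and its own frame: [rsp₀ − 296, rsp₀ − 216) and [rsp₀ − 88, rsp₀ + 8)
  have ea1 : ((u.reg .rsp - 248) >>> 3 + 12582912).toNat = 12582912 + ((u.reg .rsp).toNat - 248) / 8 := by
    u_omega
  have ea2 : ((u.reg .rsp - 248) >>> 3 + 12582932).toNat = 12582932 + ((u.reg .rsp).toNat - 248) / 8 := by
    u_omega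
  have w_same2 := w_same
  rw [w_mem_108213] at w_same2
  have hE1 : Mem.EqOn ((u.reg .rsp).toNat - 296) ((u.reg .rsp).toNat - 216) (cw_prologueMem u) s_108213r.mem := by
    unfold cw_prologueMem
    u_eqon
  have hE2 : Mem.EqOn ((u.reg .rsp).toNat - 88) ((u.reg .rsp).toNat + 8) (cw_prologueMem u) s_108213r.mem := by
    unfold cw_prologueMem
    u_eqon
  have hbody : ShadowUntouched (cw_poisonedMem u) s_108213r.mem := by
    rw [w_mem_108213] at hun_ms
    unfold cw_poisonedMem cw_prologueMem
    exact Mem.EqOn.trans (Mem.EqOn.writeLE _ _ _ _ _ _ (by u_omega) (by u_omega)) hun_ms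
  clear w_same2 w_same hsame' w_mem_108213 ea1 ea2
  have hroom : 0x700000 + 400 ≤ (u.reg .rsp).toNat := he_room
  refine hcont s_108213r w_rip w_r15 w_rbp w_r12 w_kept ⟨w_rsp, w_eq, w_df, w_mx, hsame, hbody, ?_, ?_, ?_, ?_, ?_, ?_, ?_, ?_, ?_, ?_, ?_⟩
  · rw [cw_slot_carry hE1 hE2 _ _ (by u_omega) (by u_omega)]
    exact cw_prologue_slot0 u ret he_retAddr hroom he_top
  · rw [cw_slot_carry hE1 hE2 _ _ (by u_omega) (by u_omega)]
    exact cw_prologue_slot1 u hroom he_top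
  · rw [cw_slot_carry hE1 hE2 _ _ (by u_omega) (by u_omega)]
    exact cw_prologue_slot2 u hroom he_top
  · rw [cw_slot_carry hE1 hE2 _ _ (by u_omega) (by u_omega)]
    exact cw_prologue_slot3 u hroom he_top
  · rw [cw_slot_carry hE1 hE2 _ _ (by u_omega) (by u_omega)]
    exact cw_prologue_slot4 u hroom he_top
  · rw [cw_slot_carry hE1 hE2 _ _ (by u_omega) (by u_omega)]
    exact cw_prologue_slot5 u hroom he_top
  · rw [cw_slot_carry hE1 hE2 _ _ (by u_omega) (by u_omega)]
    exact cw_prologue_slot6 u hroom he_top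
  · rw [cw_slot_carry hE1 hE2 _ _ (by u_omega) (by u_omega)]
    exact cw_prologue_slotLen u hroom he_top
  · rw [cw_slot_carry hE1 hE2 _ _ (by u_omega) (by u_omega)]
    exact cw_prologue_slotC u hroom he_top
  · rw [cw_slot_carry hE1 hE2 _ _ (by u_omega) (by u_omega)]
    exact cw_prologue_slotVal u hroom he_top
  · rw [cw_slot_carry hE1 hE2 _ _ (by u_omega) (by u_omega)]
    exact cw_prologue_slotN u hroom he_top

end Vorbis.Spec.compute_codewords_1

theorem Vorbis.Spec.Worked.compute_codewords_1_ok : Vorbis.Spec.compute_codewords_1.Statement := by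
  intro Lay hLay μ hμ u₀ hcode hmemset others frames Blk u ret he hpre
  have hpre' : CodewordsPre others frames Blk u := hpre
  refine Vorbis.Spec.compute_codewords_1.cw1_walk hLay hμ hcode (hmemset others _) he hpre'.shadow ?_
  intro s h_rip h_r15 h_rbp h_r12 h_kept h_body
  exact ReachVia.done ⟨⟨he, hpre', h_body⟩, h_rip, h_r15, h_rbp, h_r12, h_kept⟩
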